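-- pv_equiv track=rewrite | github.com/ghvik/D06 | HW06_ch09_ex03.py | avoids
-- ===== SOURCE A (Python) =====
-- def avoids(word, forbidden_letters):
--     """ return True if word NOT forbidden, aka if it's allowed """
--     # Want allowed to be a list of all True's in order
--     # to return True
--     allowed_letters = []
--     for letter in word:
--         if letter not in forbidden_letters:
--             allowed_letters.append(True)
--         else:
--             allowed_letters.append(False)
--
--     # If there is at least one forbidden letter,
--     # there will be at least one False in the list
--     if False in allowed_letters:
--         return False
--     else:
--         return True
-- ===== SOURCE B (Python) =====
-- def avoids(word, forbidden_letters):
--     """ return True if word NOT forbidden, aka if it's allowed """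
--     return set(word).isdisjoint(forbidden_letters)
-- ===== Notes on version B (the rewrite author's own statement) =====
-- stated objective: idiomatic
-- what changed: Replaces the per-letter loop, boolean list and 'False in list' scan with a single set-disjointness test between the word's distinct characters and the forbidden letters.
import Mathlib
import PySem

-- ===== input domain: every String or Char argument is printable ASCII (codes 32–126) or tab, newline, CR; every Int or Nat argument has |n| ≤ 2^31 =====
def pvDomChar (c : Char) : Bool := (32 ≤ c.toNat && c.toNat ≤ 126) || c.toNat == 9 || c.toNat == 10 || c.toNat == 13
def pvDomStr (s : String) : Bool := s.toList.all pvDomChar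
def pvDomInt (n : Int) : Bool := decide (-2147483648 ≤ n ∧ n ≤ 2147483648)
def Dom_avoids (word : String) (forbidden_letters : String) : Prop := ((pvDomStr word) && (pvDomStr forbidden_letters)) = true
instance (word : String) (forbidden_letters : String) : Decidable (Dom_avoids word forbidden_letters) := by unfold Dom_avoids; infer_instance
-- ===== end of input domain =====

-- B replaces A's per-letter loop, boolean list and 'False in list' scan with one set-disjointness test (idiomatic).

-- ===== PORT A =====
-- 'letter in forbidden_letters' on a single character is exactly character membership in the string.
def avoids (word : String) (forbidden_letters : String) : Bool :=
  let allowed_letters : List Bool :=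
    word.toList.foldl
      (fun acc letter =>
        if !(forbidden_letters.toList.contains letter) then acc ++ [true]
        else acc ++ [false])
      []
  if allowed_letters.contains false then false else true

-- ===== PORT B =====
def avoids_alt (word : String) (forbidden_letters : String) : Bool :=
  PySem.Set.isdisjoint (PySem.Set.ofList word.toList) forbidden_letters.toList

-- ===== PRECONDITION & SPEC =====
def Spec_avoids (word : String) (forbidden_letters : String) (out : Bool) : Prop := out = avoids_alt word forbidden_letters
instance (word : String) (forbidden_letters : String) (out : Bool) : Decidable (Spec_avoids word forbidden_letters out) := by unfold Spec_avoids; infer_instance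

-- ===== CLAIM (what is proved, stated in full; the proofs are below) =====
def Claim_equal_avoids : Prop := ∀ (word : String) (forbidden_letters : String), Dom_avoids word forbidden_letters → Spec_avoids word forbidden_letters (avoids word forbidden_letters)

-- ===== LEMMAS AND PROOFS =====

-- 'False in map g l' is the negation of 'all g l'.
theorem map_contains_false_eq_not_all (l : List Char) (g : Char → Bool) :
    ((l.map g).contains false) = !l.all g := by
  induction l with
  | nil => simp
  | cons c t ih =>
    simp only [List.map_cons, List.contains_cons, List.all_cons, Bool.not_and, ih]
    cases g c <;> simp

-- Both sides equal "no character of the word is a forbidden letter".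
theorem avoids_eq_all (word forbidden_letters : String) :
    avoids word forbidden_letters
      = word.toList.all (fun c => !(forbidden_letters.toList.contains c)) := by
  unfold avoids
  rw [show (fun (acc : List Bool) letter =>
        if !(forbidden_letters.toList.contains letter) then acc ++ [true]
        else acc ++ [false])
      = (fun (acc : List Bool) letter =>
        acc ++ [!(forbidden_letters.toList.contains letter)]) by
    funext acc letter; by_cases h : letter ∈ forbidden_letters.toList <;> simp [h]]
  rw [PySem.List.foldl_append_singleton_eq_map]
  simp only [List.nil_append, map_contains_false_eq_not_all]
  cases hall : word.toList.all (fun c => !(forbidden_letters.toList.contains c)) <;>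
    simp only [Bool.not_false, Bool.not_true] <;> rfl

theorem avoids_alt_eq_all (word forbidden_letters : String) :
    avoids_alt word forbidden_letters
      = word.toList.all (fun c => !(forbidden_letters.toList.contains c)) := by
  unfold avoids_alt
  rcases h : PySem.Set.isdisjoint (PySem.Set.ofList word.toList) forbidden_letters.toList with _ | _
  · symm
    rw [Bool.eq_false_iff]
    intro hall
    rw [Bool.eq_false_iff] at h
    apply h
    rw [PySem.Set.isdisjoint_iff]
    intro x hx
    have hx' : x ∈ word.toList := (PySem.Set.mem_ofList _ _).mp hx
    have := List.all_eq_true.mp hall x hx'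
    simpa using this
  · symm
    rw [PySem.Set.isdisjoint_iff] at h
    rw [List.all_eq_true]
    intro c hc
    have := h c ((PySem.Set.mem_ofList _ _).mpr hc)
    simpa using this

-- ===== VERDICT (by name: the statement is the Claim_ definition above) =====
theorem avoids_spec : Claim_equal_avoids := by
  intro word forbidden_letters _
  unfold Spec_avoids
  rw [avoids_eq_all, avoids_alt_eq_all]
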